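-- pv_equiv track=rewrite | github.com/replicaCortex/Csharp | Task/1task/report/1task.py | Flowerbed
-- ===== SOURCE A (Python) =====
-- def Flowerbed(flowerbed, n):
--     start, end = 0, 3
--     flowerbed = [0] + flowerbed + [0]
--
--     while n > 0 and end <= len(flowerbed):
--         subflower = flowerbed[start:end]
--         if 1 not in subflower:
--             n -= 1
--             flowerbed[(end + start) // 2] = 1
--
--         start += 1
--         end += 1
--
--     if n == 0:
--         return True
--
--     return False
-- ===== SOURCE B (Python) =====
-- def Flowerbed(flowerbed, n):
--     # Gap arithmetic: each maximal run of L consecutive non-1 cells (with a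
--     # virtual empty plot padded on each side) admits (L - 1) // 2 plantings.
--     maxplant = 0
--     run = 1  # virtual leading empty plot
--     for x in flowerbed:
--         if x == 1:
--             if run:
--                 maxplant += (run - 1) // 2
--             run = 0
--         else:
--             run += 1
--     maxplant += run // 2  # close the run extended by the virtual trailing plot
--     return 0 <= n <= maxplant
-- ===== Notes on version B (the rewrite author's own statement) =====
-- stated objective: simpler
-- what changed: B replaces A's mutating sliding-window planting simulation (pad, slice each 3-cell window, plant into the list) by a single arithmetic scan that sums (L-1)//2 over maximal runs of plantable cells on the padded bed and compares n against that total; no per-step slicing gives a constant-factor speedup.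
import Mathlib
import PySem

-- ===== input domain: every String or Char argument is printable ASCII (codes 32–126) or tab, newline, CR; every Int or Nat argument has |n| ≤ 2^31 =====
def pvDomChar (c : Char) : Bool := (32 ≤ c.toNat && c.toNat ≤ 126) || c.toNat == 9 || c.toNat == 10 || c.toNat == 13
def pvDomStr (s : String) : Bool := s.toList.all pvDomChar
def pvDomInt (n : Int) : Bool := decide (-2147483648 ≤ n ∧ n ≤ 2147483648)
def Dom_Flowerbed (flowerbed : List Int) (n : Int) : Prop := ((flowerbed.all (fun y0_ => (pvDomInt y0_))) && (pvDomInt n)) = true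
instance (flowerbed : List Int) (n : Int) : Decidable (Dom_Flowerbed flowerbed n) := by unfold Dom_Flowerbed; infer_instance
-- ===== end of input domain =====

-- B replaces A's mutating sliding-window planting simulation by a single arithmetic
-- scan over runs of plantable cells (objective: simpler).


-- ===== PORT A =====
-- The while loop; s and e are Python's start/end, which stay nonnegative (s starts
-- at 0, e at 3, both only increment), so carrying them as Nat is exact; (e + s) // 2
-- on nonnegative ints is Nat division.
def flowerbedALoop (fb : List Int) (n : Int) (s e : Nat) : Int :=
  if h : 0 < n ∧ e ≤ fb.length then
    let subflower := PySem.List.slice fb (some (s : Int)) (some (e : Int))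
    if (1 : Int) ∈ subflower then
      flowerbedALoop fb n (s + 1) (e + 1)
    else
      flowerbedALoop (fb.set ((e + s) / 2) 1) (n - 1) (s + 1) (e + 1)
  else n
termination_by fb.length + 1 - e
decreasing_by
  · omega
  · simp only [List.length_set]; omega

def Flowerbed (flowerbed : List Int) (n : Int) : Bool :=
  decide (flowerbedALoop ((0 : Int) :: flowerbed ++ [0]) n 0 3 = 0)

-- ===== PORT B =====
-- Source B's for loop with its two accumulators; maxplant and run are nonnegative
-- counters (run only ever holds run lengths), so Nat division is Python's //.
def flowerbedBLoop : List Int → Nat → Nat → Nat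
  | [], maxplant, run => maxplant + run / 2
  | x :: xs, maxplant, run =>
    if x = 1 then
      flowerbedBLoop xs (maxplant + (if run ≠ 0 then (run - 1) / 2 else 0)) 0
    else
      flowerbedBLoop xs maxplant (run + 1)

def Flowerbed_alt (flowerbed : List Int) (n : Int) : Bool :=
  decide (0 ≤ n ∧ n ≤ (flowerbedBLoop flowerbed 0 1 : Int))

-- ===== PRECONDITION & SPEC =====
def Spec_Flowerbed (flowerbed : List Int) (n : Int) (out : Bool) : Prop := out = Flowerbed_alt flowerbed n
instance (flowerbed : List Int) (n : Int) (out : Bool) : Decidable (Spec_Flowerbed flowerbed n out) := by unfold Spec_Flowerbed; infer_instance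

-- ===== CLAIM (what is proved, stated in full; the proofs are below) =====
def Claim_equal_Flowerbed : Prop := ∀ (flowerbed : List Int) (n : Int), Dom_Flowerbed flowerbed n → Spec_Flowerbed flowerbed n (Flowerbed flowerbed n)

-- ===== LEMMAS AND PROOFS =====

-- Non-mutating reformulation of A's loop: a, b are the current values of the two
-- cells before the fresh cell c; planting turns the middle cell into a 1.
def loop2 : Int → Int → List Int → Int → Int
  | _, _, [], n => n
  | a, b, c :: cs, n =>
    if n ≤ 0 then n
    else if a ≠ 1 ∧ b ≠ 1 ∧ c ≠ 1 then loop2 1 c cs (n - 1) else loop2 b c cs n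

-- Unbounded greedy plant count from state (a, b).
def plants : Int → Int → List Int → Nat
  | _, _, [] => 0
  | a, b, c :: cs =>
    if a ≠ 1 ∧ b ≠ 1 ∧ c ≠ 1 then 1 + plants 1 c cs else plants b c cs

-- Accumulator-free version of B's scan.
def bcount : List Int → Nat → Nat
  | [], r => r / 2
  | c :: cs, r =>
    if c = 1 then (if r ≠ 0 then (r - 1) / 2 else 0) + bcount cs 0
    else bcount cs (r + 1)

theorem bloop_eq (l : List Int) : ∀ (m r : Nat), flowerbedBLoop l m r = m + bcount l r := by
  induction l with
  | nil => intro m r; simp [flowerbedBLoop, bcount]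
  | cons c cs ih =>
    intro m r
    by_cases hc : c = 1 <;> simp [flowerbedBLoop, bcount, hc, ih, Nat.add_assoc]

theorem aloop_eq (rest : List Int) : ∀ (pre : List Int) (a b : Int) (n : Int),
    flowerbedALoop (pre ++ a :: b :: rest) n pre.length (pre.length + 3) = loop2 a b rest n := by
  induction rest with
  | nil =>
    intro pre a b n
    rw [flowerbedALoop]
    have hlen : (pre ++ [a, b]).length = pre.length + 2 := by simp
    rw [dif_neg (by rw [hlen]; omega)]
    simp [loop2]
  | cons c cs ih =>
    intro pre a b n
    rw [flowerbedALoop]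
    by_cases hn : 0 < n
    · have hlen : pre.length + 3 ≤ (pre ++ a :: b :: c :: cs).length := by
        simp [List.length_append]
      rw [dif_pos ⟨hn, hlen⟩]
      have hslice : PySem.List.slice (pre ++ a :: b :: c :: cs)
          (some (pre.length : Int)) (some ((pre.length + 3 : Nat) : Int)) = [a, b, c] := by
        have h3 : ((pre.length + 3 : Nat) : Int) = ((pre.length : Nat) : Int) + ((3 : Nat) : Int) := by
          push_cast; ring
        rw [h3, PySem.List.slice_natCast_add, List.drop_left]
        rfl
      simp only [hslice]
      have hre : ∀ (x : Int), pre ++ a :: x :: c :: cs = (pre ++ [a]) ++ x :: c :: cs := by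
        intro x; simp
      have hl1 : (pre ++ [a]).length = pre.length + 1 := by simp
      by_cases hmem : (1 : Int) ∈ [a, b, c]
      · rw [if_pos hmem, hre b]
        have h := ih (pre ++ [a]) b c n
        rw [hl1] at h
        have harith : pre.length + 1 + 3 = pre.length + 3 + 1 := by omega
        rw [harith] at h
        rw [h]
        have : ¬ (a ≠ 1 ∧ b ≠ 1 ∧ c ≠ 1) := by
          simp at hmem
          rcases hmem with h1 | h1 | h1 <;> simp [h1]
        simp [loop2, this, not_le.mpr hn]
      · rw [if_neg hmem]
        have hidx : (pre.length + 3 + pre.length) / 2 = pre.length + 1 := by omega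
        have hset : (pre ++ a :: b :: c :: cs).set (pre.length + 1) 1
            = (pre ++ [a]) ++ (1 : Int) :: c :: cs := by
          rw [List.set_append_right _ _ (by omega)]
          simp
        rw [hidx, hset]
        have h := ih (pre ++ [a]) 1 c (n - 1)
        rw [hl1] at h
        have harith : pre.length + 1 + 3 = pre.length + 3 + 1 := by omega
        rw [harith] at h
        rw [h]
        have hcond : a ≠ 1 ∧ b ≠ 1 ∧ c ≠ 1 := by
          simp at hmem
          exact ⟨fun h' => hmem.1 h'.symm, fun h' => hmem.2.1 h'.symm, fun h' => hmem.2.2 h'.symm⟩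
        simp [loop2, hcond, not_le.mpr hn]
    · rw [dif_neg (by intro h; exact hn h.1)]
      simp [loop2, le_of_not_gt hn]

theorem loop2_zero_iff (l : List Int) : ∀ (a b : Int) (n : Int), 0 ≤ n →
    (loop2 a b l n = 0 ↔ n ≤ (plants a b l : Int)) := by
  induction l with
  | nil => intro a b n hn; simp [loop2, plants]; omega
  | cons c cs ih =>
    intro a b n hn
    by_cases hz : n ≤ 0
    · have : n = 0 := le_antisymm hz hn
      subst this
      simp [loop2, plants]
      positivity
    · rw [loop2]
      rw [if_neg hz]
      by_cases hcond : a ≠ 1 ∧ b ≠ 1 ∧ c ≠ 1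
      · rw [if_pos hcond]
        rw [ih 1 c (n - 1) (by omega)]
        simp [plants, hcond]
        omega
      · rw [if_neg hcond]
        rw [ih b c n hn]
        simp [plants, hcond]

theorem plants_eq_bcount (l : List Int) : ∀ (a b : Int) (r : Nat),
    ((b = 1 ∧ r = 0) ∨ (a = 1 ∧ b ≠ 1 ∧ r % 2 = 1) ∨ (a ≠ 1 ∧ b ≠ 1 ∧ r % 2 = 0 ∧ 2 ≤ r)) →
    plants a b (l ++ [0]) + (r - 1) / 2 = bcount l r := by
  induction l with
  | nil =>
    intro a b r hcase
    rcases hcase with ⟨hb, hr⟩ | ⟨ha, hb, hr⟩ | ⟨ha, hb, hr, hr2⟩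
    · subst hb hr; simp [plants, bcount]
    · simp [plants, ha, bcount]; omega
    · have hone : (0 : Int) ≠ 1 := by decide
      simp [plants, ha, hb, hone, bcount]; omega
  | cons c cs ih =>
    intro a b r hcase
    simp only [List.cons_append]
    by_cases hc : c = 1
    · subst hc
      have hplants : plants a b ((1 : Int) :: (cs ++ [0])) = plants b 1 (cs ++ [0]) := by
        simp [plants]
      have hnext := ih b 1 0 (Or.inl ⟨rfl, rfl⟩)
      rw [hplants]
      simp [bcount]
      split <;> omega
    · simp [bcount, hc]
      rcases hcase with ⟨hb, hr⟩ | ⟨ha, hb, hr⟩ | ⟨ha, hb, hr, hr2⟩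
      · subst hb hr
        have hplants : plants a 1 (c :: (cs ++ [0])) = plants 1 c (cs ++ [0]) := by
          simp [plants]
        have hnext := ih 1 c 1 (Or.inr (Or.inl ⟨rfl, hc, rfl⟩))
        rw [hplants]; omega
      · have hplants : plants a b (c :: (cs ++ [0])) = plants b c (cs ++ [0]) := by
          simp [plants, ha]
        have hnext := ih b c (r + 1) (Or.inr (Or.inr ⟨hb, hc, by omega, by omega⟩))
        rw [hplants]; omega
      · have hplants : plants a b (c :: (cs ++ [0])) = 1 + plants 1 c (cs ++ [0]) := by
          simp [plants, ha, hb, hc]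
        have hnext := ih 1 c (r + 1) (Or.inr (Or.inl ⟨rfl, hc, by omega⟩))
        rw [hplants]; omega

theorem aloop_main (fb : List Int) (n : Int) :
    Flowerbed fb n = Flowerbed_alt fb n := by
  unfold Flowerbed Flowerbed_alt
  rw [decide_eq_decide]
  cases fb with
  | nil =>
    rw [flowerbedALoop]
    simp [flowerbedBLoop]
    omega
  | cons x xs =>
    have hA : (0 : Int) :: (x :: xs) ++ [0] = [] ++ (0 : Int) :: x :: (xs ++ [0]) := by simp
    rw [hA]
    have h := aloop_eq (xs ++ [0]) [] 0 x n
    simp only [List.length_nil, List.nil_append] at h ⊢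
    rw [h]
    have hB : flowerbedBLoop (x :: xs) 0 1 = bcount (x :: xs) 1 := by
      rw [bloop_eq]; omega
    rw [hB]
    have hpb : plants 0 x (xs ++ [0]) = bcount (x :: xs) 1 := by
      by_cases hx : x = 1
      · subst hx
        have := plants_eq_bcount xs 0 1 0 (Or.inl ⟨rfl, rfl⟩)
        simp [bcount]
        omega
      · have h0 : (0 : Int) ≠ 1 := by decide
        have := plants_eq_bcount xs 0 x 2 (Or.inr (Or.inr ⟨h0, hx, rfl, le_refl 2⟩))
        simp [bcount, hx]
        omega
    by_cases hn : 0 ≤ n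
    · rw [loop2_zero_iff (xs ++ [0]) 0 x n hn, hpb]
      constructor
      · intro hle; exact ⟨hn, hle⟩
      · intro hle; exact hle.2
    · have hne : ¬ (n = 0 ∧ True) := by omega
      cases hxs : xs ++ [0] with
      | nil => exact absurd hxs (by simp)
      | cons c cs =>
        simp [loop2, le_of_not_ge (by omega : ¬ 0 ≤ n)]
        omega

-- ===== VERDICT (by name: the statement is the Claim_ definition above) =====
theorem Flowerbed_spec : Claim_equal_Flowerbed := by
  intro flowerbed n _
  unfold Spec_Flowerbed
  exact aloop_main flowerbed n
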